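-- pv_equiv track=rewrite | github.com/WolfTech-Innovations/wolfOS_amd64 | ChromiumOS/chromite/cli/cros/cros_cron.py | systemd_escape
-- ===== SOURCE A (Python) =====
-- import string
--
-- def systemd_escape(input_str: str) -> str:
--     r"""Escape a string for usage as a parameter to a systemd template.
--
--     Systemd uses the following escaping algorithm:
--     - / (slash) becomes - (hyphen)
--     - - (hyphen) and other non-alphanumeric characters becomes \xHH, where HH is
--       the 2-character hexadecimal representation.
--
--     This function should mirror the functionality of the systemd-escape command.
--
--     Args:
--         input_str: The string to be escaped.
--
--     Returns:
--         An escaped string according to the algorithm described above.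
--     """
--
--     def translate_char(char: str) -> str:
--         if char == "/":
--             return "-"
--         if char in string.ascii_letters + string.digits:
--             return char
--         return rf"\x{ord(char):02X}"
--
--     return "".join(translate_char(x) for x in input_str)
-- ===== SOURCE B (Python) =====
-- import re
--
-- _UNSAFE = re.compile(r"[^a-zA-Z0-9]")
--
--
-- def _replace(m: "re.Match") -> str:
--     ch = m.group()
--     return "-" if ch == "/" else rf"\x{ord(ch):02X}"
--
--
-- def systemd_escape(input_str: str) -> str:
--     return _UNSAFE.sub(_replace, input_str)
-- ===== Notes on version B (the rewrite author's own statement) =====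
-- stated objective: idiomatic
-- what changed: Replaces the transform-every-char-and-join pass by a single compiled re.sub over the unsafe-character class [^a-zA-Z0-9] with a replacement callback, so safe characters pass through without entering Python-level code.
import Mathlib
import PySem

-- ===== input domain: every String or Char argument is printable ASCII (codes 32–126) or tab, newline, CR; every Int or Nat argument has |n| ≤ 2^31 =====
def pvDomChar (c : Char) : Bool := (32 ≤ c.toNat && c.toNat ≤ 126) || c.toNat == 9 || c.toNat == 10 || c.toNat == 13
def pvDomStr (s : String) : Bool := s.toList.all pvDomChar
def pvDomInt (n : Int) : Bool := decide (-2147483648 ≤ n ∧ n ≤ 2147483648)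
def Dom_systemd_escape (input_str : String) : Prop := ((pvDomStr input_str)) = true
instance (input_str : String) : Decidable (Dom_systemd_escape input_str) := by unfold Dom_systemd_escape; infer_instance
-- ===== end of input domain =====

-- B is a regex-style find-the-exceptions pass instead of A's transform-every-char-and-join pass.

-- shared primitive: the f-string rf"\x{ord(char):02X}" (uppercase hex, padded to width 2), exact for all codepoints
def pvHexDigit (n : Nat) : Char :=
  if n < 10 then Char.ofNat (48 + n) else Char.ofNat (55 + n)

def pvHexRec (n : Nat) : List Char :=
  if h : n < 16 then [pvHexDigit n]
  else pvHexRec (n / 16) ++ [pvHexDigit (n % 16)]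
decreasing_by exact Nat.div_lt_self (by omega) (by omega)

def pvHex02 (n : Nat) : List Char :=
  let ds := pvHexRec n
  if ds.length < 2 then '0' :: ds else ds

-- ===== PORT A =====
-- string.ascii_letters + string.digits
def aKeptChars : List Char :=
  "abcdefghijklmnopqrstuvwxyzABCDEFGHIJKLMNOPQRSTUVWXYZ0123456789".toList

def aTranslateChar (c : Char) : List Char :=
  if c = '/' then ['-']
  else if aKeptChars.contains c then [c]
  else '\\' :: 'x' :: pvHex02 c.toNat

def systemd_escape (input_str : String) : String :=
  String.mk ((input_str.toList.map aTranslateChar).flatten)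

-- ===== PORT B =====
-- the regex character class [^a-zA-Z0-9]: a char the pattern does NOT match
def bSafe (c : Char) : Bool :=
  ('a' ≤ c && c ≤ 'z') || ('A' ≤ c && c ≤ 'Z') || ('0' ≤ c && c ≤ '9')

-- the replacement callback
def bReplace (c : Char) : List Char :=
  if c = '/' then ['-'] else '\\' :: 'x' :: pvHex02 c.toNat

-- re.sub scan: copy the maximal safe run, replace the next match, continue
def bSub (cs : List Char) : List Char :=
  match h : cs.dropWhile bSafe with
  | [] => cs
  | c :: rest =>
      cs.takeWhile bSafe ++ bReplace c ++ bSub rest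
termination_by cs.length
decreasing_by
  have h1 : (cs.dropWhile bSafe).length ≤ cs.length := List.length_dropWhile_le ..
  rw [h] at h1; simp at h1; omega

def systemd_escape_alt (input_str : String) : String :=
  String.mk (bSub input_str.toList)

-- ===== PRECONDITION & SPEC =====
def Spec_systemd_escape (input_str : String) (out : String) : Prop := out = systemd_escape_alt input_str
instance (input_str : String) (out : String) : Decidable (Spec_systemd_escape input_str out) := by unfold Spec_systemd_escape; infer_instance

-- ===== CLAIM (what is proved, stated in full; the proofs are below) =====
def Claim_equal_systemd_escape : Prop := ∀ (input_str : String), Dom_systemd_escape input_str → Spec_systemd_escape input_str (systemd_escape input_str)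

-- ===== LEMMAS AND PROOFS =====

lemma kept_eq_safe (c : Char) : aKeptChars.contains c = bSafe c := by
  have hk : aKeptChars = ('a'::'b'::'c'::'d'::'e'::'f'::'g'::'h'::'i'::'j'::'k'::'l'::'m'::'n'::'o'::'p'::'q'::'r'::'s'::'t'::'u'::'v'::'w'::'x'::'y'::'z'::'A'::'B'::'C'::'D'::'E'::'F'::'G'::'H'::'I'::'J'::'K'::'L'::'M'::'N'::'O'::'P'::'Q'::'R'::'S'::'T'::'U'::'V'::'W'::'X'::'Y'::'Z'::'0'::'1'::'2'::'3'::'4'::'5'::'6'::'7'::'8'::'9'::[]) := by decide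
  rw [hk, bSafe, Bool.eq_iff_iff]
  simp [List.contains_eq_mem, Char.le_def, Char.ext_iff, UInt32.le_iff_toNat_le, UInt32.ext_iff]
  omega

lemma translate_eq (c : Char) :
    aTranslateChar c = if bSafe c then [c] else bReplace c := by
  by_cases h : c = '/'
  · subst h; decide
  · rw [aTranslateChar, if_neg h, kept_eq_safe, bReplace, if_neg h]

lemma safe_run (l : List Char) (hl : ∀ x ∈ l, bSafe x) :
    (l.map aTranslateChar).flatten = l := by
  induction l with
  | nil => rfl
  | cons a t ih =>
    simp only [List.map_cons, List.flatten_cons, translate_eq, hl a (by simp),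
      if_true, List.cons_append, List.nil_append]
    rw [ih (fun x hx => hl x (by simp [hx]))]

lemma bSub_eq (cs : List Char) : bSub cs = (cs.map aTranslateChar).flatten := by
  induction cs using bSub.induct with
  | case1 cs h =>
    rw [bSub, h]
    have : ∀ x ∈ cs, bSafe x := by
      intro x hx
      have := List.takeWhile_append_dropWhile (p := bSafe) (l := cs)
      rw [h, List.append_nil] at this
      exact List.mem_takeWhile_imp (by rw [this]; exact hx)
    rw [safe_run cs this]
  | case2 cs c rest h ih =>
    rw [bSub]
    split
    · rename_i heq; rw [heq] at h; cases h
    · rename_i c' rest' heq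
      rw [h] at heq
      injection heq with h1 h2; subst h1; subst h2
      conv_rhs => rw [← List.takeWhile_append_dropWhile (p := bSafe) (l := cs), h]
      rw [List.map_append, List.flatten_append, List.map_cons, List.flatten_cons,
        safe_run _ (fun x hx => List.mem_takeWhile_imp hx), ih]
      have hc : bSafe c = false := by
        have := List.head?_dropWhile_not bSafe cs
        rw [h] at this; simpa using this
      rw [translate_eq, hc]
      simp

-- ===== VERDICT (by name: the statement is the Claim_ definition above) =====
theorem systemd_escape_spec : Claim_equal_systemd_escape := by
  intro s _
  unfold Spec_systemd_escape systemd_escape systemd_escape_alt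
  rw [bSub_eq]
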